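-- pv_equiv track=rewrite | github.com/bovod-sjtu/ISA-Bench | code/metric/d/compute_if_bleu.py | to_sacrebleu_refs
-- ===== SOURCE A (Python) =====
-- from typing import Any, Dict, List, Tuple, Union
--
-- def to_sacrebleu_refs(mult_refs: List[List[str]]) -> List[List[str]]:
--     if not mult_refs:
--         return []
--     max_nrefs = max(len(r) for r in mult_refs)
--     ref_sets = [[] for _ in range(max_nrefs)]
--     for refs in mult_refs:
--         for j in range(max_nrefs):
--             ref_sets[j].append(refs[j] if j < len(refs) else refs[0])
--     return ref_sets
-- ===== SOURCE B (Python) =====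
-- from typing import List
--
-- def to_sacrebleu_refs(mult_refs: List[List[str]]) -> List[List[str]]:
--     if not mult_refs:
--         return []
--     if all(not r for r in mult_refs):
--         return []
--     # pair each row with its fallback (its first element), then peel columns
--     # off the front until every row is exhausted -- no max length is computed.
--     pairs = [(r, r[0]) for r in mult_refs]
--     out = []
--     while any(r for r, _ in pairs):
--         out.append([r[0] if r else f for r, f in pairs])
--         pairs = [(r[1:], f) for r, f in pairs]
--     return out
-- ===== Notes on version B (the rewrite author's own statement) =====
-- stated objective: alternative
-- what changed: B never computes the maximum row length or preallocates column buckets: it pairs each row with its fallback first element and repeatedly peels the first remaining element off every row, emitting one column per iteration until all rows are exhausted.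
import Mathlib
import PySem

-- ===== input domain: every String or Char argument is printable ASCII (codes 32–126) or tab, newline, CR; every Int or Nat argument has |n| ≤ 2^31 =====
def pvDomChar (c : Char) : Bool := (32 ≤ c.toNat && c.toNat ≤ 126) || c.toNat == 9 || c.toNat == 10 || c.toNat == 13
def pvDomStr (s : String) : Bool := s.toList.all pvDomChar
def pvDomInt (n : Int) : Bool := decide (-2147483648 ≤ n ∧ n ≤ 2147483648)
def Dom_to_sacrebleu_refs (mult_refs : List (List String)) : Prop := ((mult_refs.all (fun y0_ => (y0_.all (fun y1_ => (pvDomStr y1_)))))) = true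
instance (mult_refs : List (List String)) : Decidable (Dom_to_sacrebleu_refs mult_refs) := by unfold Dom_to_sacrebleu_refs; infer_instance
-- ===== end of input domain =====

-- B replaces A's max-length/preallocated-bucket double loop by a column-peeling loop
-- over (row, fallback) pairs that never computes the maximum; same cost, alternative algorithm.

-- ===== PORT A =====
-- Python's `max(len(r) for r in mult_refs)` over a NONEMPTY list of Nats equals foldl Nat.max 0.
-- `refs[j]`/`refs[0]` are taken with getD: exact under Pre_ (j < len refs in the branch; rows nonempty
-- whenever the fallback fires), and outside Pre_ Python A raises IndexError (excluded).
def to_sacrebleu_refs (mult_refs : List (List String)) : List (List String) :=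
  if mult_refs = [] then []
  else
    let max_nrefs := (mult_refs.map List.length).foldl Nat.max 0
    mult_refs.foldl
      (fun ref_sets refs =>
        (List.range max_nrefs).foldl
          (fun rs j =>
            rs.modify j (fun col => col ++ [if j < refs.length then refs.getD j "" else refs.getD 0 ""]))
          ref_sets)
      (List.replicate max_nrefs ([] : List String))

-- ===== PORT B =====
-- termination measure for B's while loop: the total remaining length strictly drops.
theorem pv_tail_sum_lt (ps : List (List String × String))
    (h : ∃ p ∈ ps, p.1 ≠ []) :
    (ps.map (fun p => p.1.tail.length)).sum < (ps.map (fun p => p.1.length)).sum := by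
  induction ps with
  | nil => simp at h
  | cons q t ih =>
    have hle : (t.map (fun p : List String × String => p.1.tail.length)).sum
        ≤ (t.map (fun p : List String × String => p.1.length)).sum := by
      apply List.sum_le_sum
      intro p _
      simp [List.length_tail]
    obtain ⟨p, hp, hne⟩ := h
    rcases List.mem_cons.1 hp with rfl | hp'
    · have : p.1.tail.length < p.1.length := by
        cases hq : p.1 with
        | nil => exact absurd hq hne
        | cons a b => simp
      simp only [List.map_cons, List.sum_cons]
      omega
    · have := ih ⟨p, hp', hne⟩
      have hq : q.1.tail.length ≤ q.1.length := by simp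
      simp only [List.map_cons, List.sum_cons]
      omega

-- B's while loop: while some row still has elements, emit the column of current heads
-- (fallback where exhausted) and drop the head of every row. `r[0]` of the nonempty rows
-- is headD; the fallback component was built from `r[0]`, exact under Pre_.
def altGo (pairs : List (List String × String)) : List (List String) :=
  if pairs.any (fun p => !p.1.isEmpty) then
    (pairs.map (fun p => if p.1.isEmpty then p.2 else p.1.headD "")) ::
      altGo (pairs.map (fun p => (p.1.tail, p.2)))
  else []
termination_by (pairs.map (fun p => p.1.length)).sum
decreasing_by
  rename_i h
  simp only [List.any_eq_true, Bool.not_eq_eq_eq_not, Bool.not_true, List.isEmpty_eq_false_iff] at h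
  simp only [List.map_map]
  exact lt_of_eq_of_lt
    (congrArg List.sum (List.attach_map_val (l := pairs) (f := fun p => p.1.tail.length)))
    (pv_tail_sum_lt pairs h)

def to_sacrebleu_refs_alt (mult_refs : List (List String)) : List (List String) :=
  if mult_refs = [] then []
  else if mult_refs.all (·.isEmpty) then []
  else altGo (mult_refs.map (fun r => (r, r.headD "")))

-- ===== PRECONDITION & SPEC =====
-- Pre_ excludes inputs mixing an empty and a nonempty reference row: there both Pythons raise
-- IndexError (r[0] on the empty row), so A returns on exactly the inputs admitted here.
def Pre_to_sacrebleu_refs (mult_refs : List (List String)) : Prop :=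
  (∀ r ∈ mult_refs, r = []) ∨ (∀ r ∈ mult_refs, r ≠ [])
instance (mult_refs : List (List String)) : Decidable (Pre_to_sacrebleu_refs mult_refs) := by
  unfold Pre_to_sacrebleu_refs; infer_instance

def pvWitness_to_sacrebleu_refs : List (List String) := [["a", "b"], ["c"]]

def Spec_to_sacrebleu_refs (mult_refs : List (List String)) (out : List (List String)) : Prop := out = to_sacrebleu_refs_alt mult_refs
instance (mult_refs : List (List String)) (out : List (List String)) : Decidable (Spec_to_sacrebleu_refs mult_refs out) := by unfold Spec_to_sacrebleu_refs; infer_instance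

-- ===== CLAIM (what is proved, stated in full; the proofs are below) =====
def Claim_equal_to_sacrebleu_refs : Prop := ∀ (mult_refs : List (List String)), Dom_to_sacrebleu_refs mult_refs → Pre_to_sacrebleu_refs mult_refs → Spec_to_sacrebleu_refs mult_refs (to_sacrebleu_refs mult_refs)

-- ===== LEMMAS AND PROOFS =====

theorem pv_foldl_max_ge_init (l : List Nat) (a : Nat) : a ≤ l.foldl Nat.max a := by
  induction l generalizing a with
  | nil => simp
  | cons y t ih => exact le_trans (Nat.le_max_left a y) (ih (Nat.max a y))

theorem pv_le_foldl_max (l : List Nat) (a x : Nat) (hx : x ∈ l) : x ≤ l.foldl Nat.max a := by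
  induction l generalizing a with
  | nil => simp at hx
  | cons y t ih =>
    rcases List.mem_cons.1 hx with rfl | hx'
    · exact le_trans (Nat.le_max_right a x) (pv_foldl_max_ge_init t _)
    · exact ih _ hx'

theorem pv_foldl_max_zero (l : List Nat) (h : ∀ x ∈ l, x = 0) : l.foldl Nat.max 0 = 0 := by
  induction l with
  | nil => rfl
  | cons y t ih =>
    have hy := h y (by simp)
    subst hy
    exact ih (fun x hx => h x (by simp [hx]))

theorem pv_foldl_const {α β : Type} (l : List α) (s : β) : l.foldl (fun s _ => s) s = s := by
  induction l generalizing s with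
  | nil => rfl
  | cons y t ih => exact ih s

-- A's inner loop preserves length.
theorem pv_innerA_len (F : Nat → String) (n : Nat) (rs : List (List String)) :
    ((List.range n).foldl (fun s j => s.modify j (fun c => c ++ [F j])) rs).length = rs.length := by
  induction n with
  | zero => simp
  | succ n ih => simp [List.range_succ, List.foldl_append, ih]

-- A's inner loop, pointwise: modifying every index in range n appends F j at position j.
theorem pv_innerA_get (F : Nat → String) (n : Nat) (rs : List (List String)) (j : Nat)
    (h : j < rs.length) :
    ((List.range n).foldl (fun s j => s.modify j (fun c => c ++ [F j])) rs)[j]'(by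
        rw [pv_innerA_len]; exact h)
      = if j < n then rs[j] ++ [F j] else rs[j] := by
  induction n with
  | zero => simp
  | succ n ih =>
    have hlen := pv_innerA_len F n rs
    simp only [List.range_succ, List.foldl_append, List.foldl_cons, List.foldl_nil]
    rw [List.getElem_modify]
    by_cases hj : n = j
    · subst hj
      rw [ih]
      simp
    · rw [ih]
      by_cases h1 : j < n
      · simp [h1, Nat.lt_succ_of_lt h1, hj]
      · have : ¬ j < n + 1 := by omega
        simp [h1, this, hj]

-- A's outer loop preserves length.
theorem pv_outerA_len (n : Nat) (ms : List (List String)) (acc : List (List String)) :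
    (ms.foldl
        (fun ref_sets refs =>
          (List.range n).foldl
            (fun rs j =>
              rs.modify j (fun c => c ++ [if j < refs.length then refs.getD j "" else refs.getD 0 ""]))
            ref_sets)
        acc).length = acc.length := by
  induction ms generalizing acc with
  | nil => rfl
  | cons refs ms ih =>
    simp only [List.foldl_cons]
    rw [ih, pv_innerA_len]

-- A's outer loop, pointwise: column j collects the per-row values in order.
theorem pv_outerA_get (n : Nat) (ms : List (List String)) (acc : List (List String))
    (hacc : acc.length = n) (j : Nat) (h : j < n) :
    (ms.foldl
        (fun ref_sets refs =>
          (List.range n).foldl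
            (fun rs j =>
              rs.modify j (fun c => c ++ [if j < refs.length then refs.getD j "" else refs.getD 0 ""]))
            ref_sets)
        acc)[j]'(by rw [pv_outerA_len, hacc]; exact h)
      = acc[j]'(by omega) ++ ms.map (fun refs => if j < refs.length then refs.getD j "" else refs.getD 0 "") := by
  induction ms generalizing acc with
  | nil => simp
  | cons refs ms ih =>
    simp only [List.foldl_cons, List.map_cons]
    have hlen : ((List.range n).foldl
        (fun rs j =>
          rs.modify j (fun c => c ++ [if j < refs.length then refs.getD j "" else refs.getD 0 ""]))
        acc).length = n := by rw [pv_innerA_len]; exact hacc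
    rw [ih _ hlen]
    rw [pv_innerA_get _ n acc j (by omega)]
    simp [h]

-- foldl max commutes with subtracting 1 everywhere.
theorem pv_foldl_max_pred (l : List Nat) (a : Nat) :
    (l.map (· - 1)).foldl Nat.max (a - 1) = (l.foldl Nat.max a) - 1 := by
  induction l generalizing a with
  | nil => rfl
  | cons x t ih =>
    simp only [List.map_cons, List.foldl_cons]
    rw [show Nat.max (a - 1) (x - 1) = (Nat.max a x) - 1 by
      simp only [Nat.max_def]
      split_ifs <;> omega]
    exact ih (Nat.max a x)

-- B's column-peeling loop computes exactly the columns A builds, one per index below the max.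
theorem pv_altGo (N : Nat) (ps : List (List String × String)) (hne : ps ≠ [])
    (hN : (ps.map (fun p => p.1.length)).foldl Nat.max 0 = N) :
    altGo ps = (List.range N).map
      (fun j => ps.map (fun p => if j < p.1.length then p.1.getD j "" else p.2)) := by
  induction N generalizing ps with
  | zero =>
    have hall : ∀ p ∈ ps, p.1 = [] := by
      intro p hp
      have hx : p.1.length ≤ 0 :=
        hN ▸ pv_le_foldl_max (ps.map (fun p => p.1.length)) 0 _ (List.mem_map_of_mem hp)
      exact List.eq_nil_of_length_eq_zero (Nat.le_zero.1 hx)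
    rw [altGo]
    have hcond : ps.any (fun p => !p.1.isEmpty) = false := by
      simp only [List.any_eq_false, Bool.not_eq_eq_eq_not, Bool.not_true]
      intro p hp
      simp [hall p hp]
    simp [hcond]
  | succ N ih =>
    have hex : ∃ p ∈ ps, p.1 ≠ [] := by
      by_contra hc
      push Not at hc
      have : (ps.map (fun p => p.1.length)).foldl Nat.max 0 = 0 := by
        apply pv_foldl_max_zero
        intro x hx
        obtain ⟨p, hp, rfl⟩ := List.mem_map.1 hx
        simp [hc p hp]
      omega
    have hcond : ps.any (fun p => !p.1.isEmpty) = true := by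
      obtain ⟨p, hp, hpne⟩ := hex
      simp only [List.any_eq_true]
      exact ⟨p, hp, by simpa [List.isEmpty_iff] using hpne⟩
    rw [altGo, if_pos hcond]
    have hps'ne : ps.map (fun p => (p.1.tail, p.2)) ≠ [] := by simpa using hne
    have hfold' : ((ps.map (fun p => (p.1.tail, p.2))).map
        (fun p => p.1.length)).foldl Nat.max 0 = N := by
      have he : (ps.map (fun p => (p.1.tail, p.2))).map (fun p => p.1.length)
          = (ps.map (fun p => p.1.length)).map (· - 1) := by
        simp [List.map_map, Function.comp_def, List.length_tail]
      rw [he]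
      have := pv_foldl_max_pred (ps.map (fun p => p.1.length)) 0
      simp only [Nat.zero_sub] at this
      omega
    rw [ih _ hps'ne hfold']
    rw [List.range_succ_eq_map]
    simp only [List.map_cons, List.map_map]
    refine congrArg₂ List.cons ?_ ?_
    · apply List.map_congr_left
      intro p _
      cases hp1 : p.1 with
      | nil => simp
      | cons a t => simp
    · apply List.map_congr_left
      intro j _
      simp only [Function.comp_def]
      apply List.map_congr_left
      intro p _
      cases hp1 : p.1 with
      | nil => simp
      | cons a t => simp

-- ===== VERDICT (by name: the statement is the Claim_ definition above) =====
theorem to_sacrebleu_refs_spec : Claim_equal_to_sacrebleu_refs := by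
  intro m _ hPre
  unfold Spec_to_sacrebleu_refs to_sacrebleu_refs to_sacrebleu_refs_alt
  by_cases hm : m = []
  · simp [hm]
  rw [if_neg hm, if_neg hm]
  rcases hPre with hall | hall
  · -- all rows empty: both sides are []
    have hn0 : (m.map List.length).foldl Nat.max 0 = 0 := by
      apply pv_foldl_max_zero
      intro x hx
      obtain ⟨r, hr, rfl⟩ := List.mem_map.1 hx
      simp [hall r hr]
    simp only [hn0, List.range_zero, List.foldl_nil, List.replicate_zero]
    have hAll : m.all (·.isEmpty) = true := by
      simp only [List.all_eq_true]
      intro r hr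
      simp [hall r hr]
    rw [if_pos hAll, pv_foldl_const]
  · -- all rows nonempty
    have hAllne : m.all (·.isEmpty) = false := by
      obtain ⟨r, rest, rfl⟩ : ∃ r rest, m = r :: rest := by
        cases m with
        | nil => exact absurd rfl hm
        | cons r rest => exact ⟨r, rest, rfl⟩
      have := hall r (by simp)
      simp only [List.all_eq_false]
      exact ⟨r, by simp, by simpa [List.isEmpty_iff] using this⟩
    rw [if_neg (by simp [hAllne])]
    have hpsne : m.map (fun r => (r, r.headD "")) ≠ [] := by simpa using hm
    have hfold : ((m.map (fun r => (r, r.headD ""))).map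
        (fun p => p.1.length)).foldl Nat.max 0 = (m.map List.length).foldl Nat.max 0 := by
      simp [List.map_map, Function.comp_def]
    rw [pv_altGo _ _ hpsne hfold]
    apply List.ext_getElem
    · rw [pv_outerA_len]
      simp
    · intro j h1 h2
      rw [pv_outerA_get _ _ _ (List.length_replicate) j (by rw [pv_outerA_len] at h1; simpa using h1)]
      rw [List.getElem_replicate, List.nil_append]
      rw [List.getElem_map, List.getElem_range, List.map_map]
      apply List.map_congr_left
      intro r hr
      obtain ⟨a, t, hrat⟩ : ∃ a t, r = a :: t := by
        cases r with
        | nil => exact absurd rfl (hall [] hr)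
        | cons a t => exact ⟨a, t, rfl⟩
      subst hrat
      simp
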